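-- pv_equiv track=rewrite | github.com/sushrut91/Encryption-Decryption | EncryptCharacter.py | DecryptCharacter
-- ===== SOURCE A (Python) =====
-- def DecryptCharacter(encrypt_char, letter_set, a, b):
--     #P = a'(x)-b mod p
--     #a' = a^(p-2) mod n
--     n = len(letter_set)
--     plain_char = encrypt_char
--
--     if AreRelativePrime(a, n):
--         a_inverse = (a ** (n-2)) % n
--         plain_char = (a_inverse * (encrypt_char - b)) %n
--
--         #Find the key from value
--         for key,value in letter_set.items():
--             if value == plain_char:
--                 return key
--     else:
--         return "Please change value of a such that a & n are coprime numbers, n is a prime number, n>a"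
--
-- def AreRelativePrime(n1,n2):
-- # Numbers are relative prime if their GCD is 1, Euclid's algorithm
-- # Ensure n1 is always greater
-- # Ensure that n1 is always prime
--     flag = False
--
--     if n1 > n2:
--         flag = isPrime(n1)
--     elif n2> n1:
--         flag = isPrime(n2)
--     else:
--         return 'Both a and n cannot be equal for algorithm to work'
--
--     if flag:
--         if n2 > n1 :
--             swap = n2
--             n2 = n1
--             n1 = swap
--         remainder = n1
--         while n2 > 1:
--             remainder = n1 % n2
--             n1 = n2
--             n2 = remainder
--         if remainder == 1:
--             return True
--         else:
--             return False
--     else: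
--         return False
--
-- def isPrime(n):
--     flag = True
--     for i in range(2,n):
--         if n % i == 0:
--             flag = False
--     return flag
-- ===== SOURCE B (Python) =====
-- def DecryptCharacter(encrypt_char, letter_set, a, b):
--     # affine decryption: a^-1 (x - b) mod n, via pow(a, n-2, n) (Fermat) and
--     # trial division only up to sqrt for the primality check
--     n = len(letter_set)
--     lo, hi = (a, n) if a < n else (n, a)
--     if a != n and lo > 1 and _gcd(a, n) == 1 and _is_prime(hi):
--         plain = pow(a, n - 2, n) * (encrypt_char - b) % n
--         return next((k for k, v in letter_set.items() if v == plain), None)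
--     return "Please change value of a such that a & n are coprime numbers, n is a prime number, n>a"
--
--
-- def _gcd(x, y):
--     while y:
--         x, y = y, x % y
--     return abs(x)
--
--
-- def _is_prime(x):
--     i = 2
--     while i * i <= x:
--         if x % i == 0:
--             return False
--         i += 1
--     return True
-- ===== Notes on version B (the rewrite author's own statement) =====
-- stated objective: faster
-- what changed: B replaces A's O(hi) full-range trial division with trial division up to sqrt(hi), replaces A's huge-integer a**(n-2) followed by one mod with built-in modular exponentiation pow(a,n-2,n), tests coprimality with a standard gcd loop (run to 0, not A's stop-at-1 variant) guarded by explicit a!=n / min>1 checks, and returns the first matching key via a generator with next().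
-- intended difference: When a equals len(letter_set) (A's truthy error-string bug) or the letter set is a singleton with a=1 or a<0 (A decrypts modulo 1 via floats), A returns a key or None; B returns the change-your-a error message, the intended value since such an a is never a usable affine key. — e.g. on DecryptCharacter(0, [("x", 0), ("y", 1)], 2, 0): A returns some "x", B returns some "Please change value of a such that a & n are coprime numbers, n is a prime number, n>a"
import Mathlib
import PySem

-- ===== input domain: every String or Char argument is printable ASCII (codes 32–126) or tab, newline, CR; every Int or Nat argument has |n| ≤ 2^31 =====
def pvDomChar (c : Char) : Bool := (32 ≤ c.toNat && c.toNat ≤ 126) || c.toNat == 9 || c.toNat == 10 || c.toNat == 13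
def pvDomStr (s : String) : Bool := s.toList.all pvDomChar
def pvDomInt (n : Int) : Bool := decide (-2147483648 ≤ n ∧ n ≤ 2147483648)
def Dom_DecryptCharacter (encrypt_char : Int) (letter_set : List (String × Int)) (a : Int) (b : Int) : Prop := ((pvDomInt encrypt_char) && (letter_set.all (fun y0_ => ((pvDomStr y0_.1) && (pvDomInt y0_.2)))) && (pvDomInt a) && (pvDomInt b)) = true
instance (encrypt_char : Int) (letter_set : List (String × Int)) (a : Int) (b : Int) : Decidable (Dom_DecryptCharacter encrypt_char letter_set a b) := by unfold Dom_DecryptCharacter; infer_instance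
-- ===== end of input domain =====

-- B replaces A's full-range trial division and huge-integer power with sqrt-bounded
-- trial division, a standard gcd loop and modular exponentiation (objective: faster).

-- ===== PORT A =====
-- isPrime(n): trial division over the whole range(2, n)
def pyIsPrime (n : Int) : Bool :=
  (PySem.List.pyRange 2 n 1).foldl
    (fun flag i => if PySem.Int.mod n i == 0 then false else flag) true

-- AreRelativePrime returns True/False or (when n1 == n2) a non-empty (truthy) string.
inductive RelPrimeRes where
  | b : Bool → RelPrimeRes
  | msg : RelPrimeRes            -- 'Both a and n cannot be equal …' (truthy)
deriving DecidableEq, Repr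

def RelPrimeRes.truthy : RelPrimeRes → Bool
  | .b t => t
  | .msg => true

-- while n2 > 1: remainder = n1 % n2; n1 = n2; n2 = remainder — returns final remainder
def euclidLoop (n1 n2 remainder : Int) : Int :=
  if h : 1 < n2 then euclidLoop n2 (PySem.Int.mod n1 n2) (PySem.Int.mod n1 n2)
  else remainder
termination_by n2.toNat
decreasing_by
  have h1 := PySem.Int.mod_nonneg n1 (b := n2) (by omega)
  have h2 := PySem.Int.mod_lt n1 (b := n2) (by omega)
  omega

-- body after the flag is known: swap so the loop runs on (max, min), remainder starts at max
def relPrimeCont (n1 n2 : Int) (flag : Bool) : RelPrimeRes :=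
  if flag then
    let p := if n2 > n1 then (n2, n1) else (n1, n2)
    .b (euclidLoop p.1 p.2 p.1 == 1)
  else .b false

def areRelativePrime (n1 n2 : Int) : RelPrimeRes :=
  if n1 > n2 then relPrimeCont n1 n2 (pyIsPrime n1)
  else if n2 > n1 then relPrimeCont n1 n2 (pyIsPrime n2)
  else .msg

-- for key,value in letter_set.items(): if value == plain: return key
def lookupKeyByValue (xs : List (String × Int)) (v : Int) : Option String :=
  match xs with
  | [] => none
  | (k, val) :: rest => if val = v then some k else lookupKeyByValue rest v

-- round a nonnegative integer to 53 significant bits, IEEE-754 round-half-even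
def pvRound53 (x : Int) : Int :=
  if x < 2 ^ 53 then x
  else
    let s := PySem.Int.bitLength x - 53
    let q := x / 2 ^ s
    let r := x - q * 2 ^ s
    let half : Int := 2 ^ (s - 1)
    (if half < r ∨ (r = half ∧ q % 2 = 1) then q + 1 else q) * 2 ^ s

-- is the binary64 value fl(fl(fl(1/a) % 1) * d) an integer? (a ≠ 0; |d| ≤ 2^32: no
-- overflow/subnormals; fl(1/a) % 1 adds 1 for negative a, a correctly-rounded addition)
def pvFloatRecipMulIntegral (a d : Int) : Bool :=
  let k := 52 + PySem.Int.bitLength a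
  let q := 2 ^ k / |a|
  let r := 2 ^ k - q * |a|
  let m := if |a| < 2 * r ∨ (2 * r = |a| ∧ q % 2 = 1) then q + 1 else q
  let m1 := if a < 0 then pvRound53 (2 ^ k - m) else m
  decide (((2 : Int) ^ k) ∣ pvRound53 (m1 * |d|))

def DecryptCharacter (encrypt_char : Int) (letter_set : List (String × Int)) (a : Int) (b : Int) : Option String :=
  let n : Int := letter_set.length
  if (areRelativePrime a n).truthy then
    if n - 2 < 0 then
      -- Python evaluates a ** (n-2) as a FLOAT here. Hand-ported IEEE-754 semantics, exact on
      -- Pre_, where this branch is reachable only with n = 1, a ≠ 0: there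
      -- plain_char = ((1/a % 1) * (encrypt_char - b)) % 1.0, which equals an integer value iff
      -- the correctly-rounded product is integral (then plain_char = 0.0, matching value 0).
      if pvFloatRecipMulIntegral a (encrypt_char - b) then lookupKeyByValue letter_set 0
      else none
    else
      let a_inverse := PySem.Int.mod (a ^ (n - 2).toNat) n
      let plain_char := PySem.Int.mod (a_inverse * (encrypt_char - b)) n
      lookupKeyByValue letter_set plain_char
  else
    some "Please change value of a such that a & n are coprime numbers, n is a prime number, n>a"

-- ===== PORT B =====
-- while y: x, y = y, x % y; return abs(x)
def gcdLoop (x y : Int) : Int :=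
  if h : y ≠ 0 then gcdLoop y (PySem.Int.mod x y)
  else |x|
termination_by y.natAbs
decreasing_by
  rcases lt_or_gt_of_ne h with hneg | hpos
  · have h1 := PySem.Int.mod_neg_bounds x hneg
    omega
  · have h1 := PySem.Int.mod_nonneg x hpos
    have h2 := PySem.Int.mod_lt x hpos
    omega

-- i = 2; while i*i <= x: …; i += 1
def trialLoop (x i : Int) : Bool :=
  if h : i * i ≤ x then
    if PySem.Int.mod x i == 0 then false else trialLoop x (i + 1)
  else true
termination_by (x + 1 - i).toNat
decreasing_by
  have h2 : 2 * i - 1 ≤ i * i := by nlinarith [mul_self_nonneg (i - 1)]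
  have h0 : 0 ≤ i * i := mul_self_nonneg i
  omega

def isPrimeSqrt (x : Int) : Bool := trialLoop x 2

def DecryptCharacter_alt (encrypt_char : Int) (letter_set : List (String × Int)) (a : Int) (b : Int) : Option String :=
  let n : Int := letter_set.length
  let lo : Int := if a < n then a else n
  let hi : Int := if a < n then n else a
  if a ≠ n ∧ 1 < lo ∧ gcdLoop a n = 1 ∧ isPrimeSqrt hi = true then
    -- pow(a, n-2, n): exponent n-2 is ≥ 0 whenever this branch is taken (lo > 1 forces n ≥ 2)
    let plain := PySem.Int.mod (PySem.Int.powMod a (n - 2).toNat n * (encrypt_char - b)) n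
    (letter_set.find? (fun kv => kv.2 == plain)).map (·.1)
  else
    some "Please change value of a such that a & n are coprime numbers, n is a prime number, n>a"

-- ===== PRECONDITION & SPEC =====
-- Pre_ excludes exactly the inputs on which A raises ZeroDivisionError (a ** (n-2) with a
-- negative exponent and base 0, or % 0): letter sets of size 0 with a ∈ {0, 1} and of size 1
-- with a = 0.
def Pre_DecryptCharacter (encrypt_char : Int) (letter_set : List (String × Int)) (a : Int) (b : Int) : Prop :=
  ¬ ((letter_set.length = 0 ∧ (a = 0 ∨ a = 1)) ∨ (letter_set.length = 1 ∧ a = 0))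
instance (encrypt_char : Int) (letter_set : List (String × Int)) (a : Int) (b : Int) : Decidable (Pre_DecryptCharacter encrypt_char letter_set a b) := by unfold Pre_DecryptCharacter; infer_instance

def pvWitness_DecryptCharacter : Int × (List (String × Int)) × Int × Int :=
  (0, [("x", 0), ("y", 1)], 3, 0)

-- When a equals len(letter_set), A's coprimality helper returns a non-empty error string that
-- is truthy, so A wrongly proceeds to 'decrypt' with a non-invertible a; likewise on singleton
-- letter sets with a = 1 or a < 0 A slips into float decryption with modulus 1; in both cases
-- A returns a key or None where B returns the change-your-a error message, the intended value
-- since such an a is never a usable affine key.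
def D_DecryptCharacter (encrypt_char : Int) (letter_set : List (String × Int)) (a : Int) (b : Int) : Prop :=
  a = (letter_set.length : Int) ∨ (letter_set.length = 1 ∧ (a = 1 ∨ a < 0))
instance (encrypt_char : Int) (letter_set : List (String × Int)) (a : Int) (b : Int) : Decidable (D_DecryptCharacter encrypt_char letter_set a b) := by unfold D_DecryptCharacter; infer_instance

def Spec_DecryptCharacter (encrypt_char : Int) (letter_set : List (String × Int)) (a : Int) (b : Int) (out : Option String) : Prop := ¬ D_DecryptCharacter encrypt_char letter_set a b → out = DecryptCharacter_alt encrypt_char letter_set a b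
instance (encrypt_char : Int) (letter_set : List (String × Int)) (a : Int) (b : Int) (out : Option String) : Decidable (Spec_DecryptCharacter encrypt_char letter_set a b out) := by unfold Spec_DecryptCharacter; infer_instance

def pvDiffWitness_DecryptCharacter : Int × (List (String × Int)) × Int × Int :=
  (0, [("x", 0), ("y", 1)], 2, 0)
def pvDiffWitnessOut_DecryptCharacter : (Option String) × (Option String) :=
  (some "x", some "Please change value of a such that a & n are coprime numbers, n is a prime number, n>a")

-- ===== CLAIM (what is proved, stated in full; the proofs are below) =====
def Claim_unchanged_DecryptCharacter : Prop := ∀ (encrypt_char : Int) (letter_set : List (String × Int)) (a : Int) (b : Int), Dom_DecryptCharacter encrypt_char letter_set a b → Pre_DecryptCharacter encrypt_char letter_set a b → Spec_DecryptCharacter encrypt_char letter_set a b (DecryptCharacter encrypt_char letter_set a b)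
def Claim_changed_DecryptCharacter : Prop := Dom_DecryptCharacter (pvDiffWitness_DecryptCharacter.1) (pvDiffWitness_DecryptCharacter.2.1) (pvDiffWitness_DecryptCharacter.2.2.1) (pvDiffWitness_DecryptCharacter.2.2.2) ∧ Pre_DecryptCharacter (pvDiffWitness_DecryptCharacter.1) (pvDiffWitness_DecryptCharacter.2.1) (pvDiffWitness_DecryptCharacter.2.2.1) (pvDiffWitness_DecryptCharacter.2.2.2) ∧ D_DecryptCharacter (pvDiffWitness_DecryptCharacter.1) (pvDiffWitness_DecryptCharacter.2.1) (pvDiffWitness_DecryptCharacter.2.2.1) (pvDiffWitness_DecryptCharacter.2.2.2) ∧ DecryptCharacter (pvDiffWitness_DecryptCharacter.1) (pvDiffWitness_DecryptCharacter.2.1) (pvDiffWitness_DecryptCharacter.2.2.1) (pvDiffWitness_DecryptCharacter.2.2.2) = pvDiffWitnessOut_DecryptCharacter.1 ∧ DecryptCharacter_alt (pvDiffWitness_DecryptCharacter.1) (pvDiffWitness_DecryptCharacter.2.1) (pvDiffWitness_DecryptCharacter.2.2.1) (pvDiffWitness_DecryptCharacter.2.2.2) = pvDiffWitnessOut_DecryptCharacter.2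 ∧ pvDiffWitnessOut_DecryptCharacter.1 ≠ pvDiffWitnessOut_DecryptCharacter.2
-- ===== LEMMAS AND PROOFS =====

-- A's flag-carrying foldl is an 'all' over the range
lemma foldl_flag (x : Int) (l : List Int) (bb : Bool) :
    l.foldl (fun flag i => if PySem.Int.mod x i == 0 then false else flag) bb
      = (bb && l.all (fun i => !(PySem.Int.mod x i == 0))) := by
  induction l generalizing bb with
  | nil => simp
  | cons hd tl ih =>
      simp only [List.foldl_cons, List.all_cons, ih]
      by_cases h : PySem.Int.mod x hd == 0 <;> simp [h]

lemma pyIsPrime_iff (x : Int) :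
    pyIsPrime x = true ↔ ∀ i : Int, 2 ≤ i → i < x → ¬ i ∣ x := by
  unfold pyIsPrime
  rw [foldl_flag]
  simp only [Bool.true_and, List.all_eq_true, PySem.List.mem_pyRange_one]
  constructor
  · intro h i h2 hix hdvd
    have := h i ⟨h2, hix⟩
    rw [(PySem.Int.mod_eq_zero_iff_dvd x i).mpr hdvd] at this
    simp at this
  · intro h i hi
    have := h i hi.1 hi.2
    rw [← PySem.Int.mod_eq_zero_iff_dvd x i] at this
    simpa using this

lemma trialLoop_iff (x : Int) :
    ∀ (k : Nat) (i : Int), 2 ≤ i → (x + 1 - i).toNat = k →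
      (trialLoop x i = true ↔ ∀ j : Int, i ≤ j → j * j ≤ x → ¬ j ∣ x) := by
  intro k
  induction k using Nat.strong_induction_on with
  | _ k IH =>
    intro i hi hk
    rw [trialLoop]
    by_cases h1 : i * i ≤ x
    · rw [dif_pos h1]
      by_cases h2 : PySem.Int.mod x i == 0
      · simp only [h2, if_true]
        constructor
        · intro h; exact absurd h (by simp)
        · intro h
          exact absurd ((PySem.Int.mod_eq_zero_iff_dvd x i).mp (by simpa using h2))
            (h i le_rfl h1)
      · simp only [h2, Bool.false_eq_true, if_false]
        have h2i : 2 * i - 1 ≤ i * i := by nlinarith [mul_self_nonneg (i - 1)]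
        have hlt : (x + 1 - (i + 1)).toNat < k := by omega
        rw [IH _ hlt (i + 1) (by omega) rfl]
        constructor
        · intro h j hij hjx hdvd
          rcases eq_or_lt_of_le hij with heq | hij'
          · subst heq
            exact absurd ((PySem.Int.mod_eq_zero_iff_dvd x i).mpr hdvd) (by simpa using h2)
          · exact h j (by omega) hjx hdvd
        · intro h j hij hjx
          exact h j (by omega) hjx
    · rw [dif_neg h1]
      simp only [true_iff]
      intro j hij hjx hdvd
      have : i * i ≤ j * j := by nlinarith
      omega

lemma prime_bridge (x : Int) (hx : 2 ≤ x) :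
    (∀ i : Int, 2 ≤ i → i < x → ¬ i ∣ x) ↔ (∀ j : Int, 2 ≤ j → j * j ≤ x → ¬ j ∣ x) := by
  constructor
  · intro h j h2 hjx hdvd
    have hlt : j < x := by nlinarith
    exact h j h2 hlt hdvd
  · intro h i h2 hix hdvd
    obtain ⟨d, hd⟩ := hdvd
    have hdpos : 0 < d := by nlinarith
    have hd2 : 2 ≤ d := by
      rcases eq_or_lt_of_le (by omega : (1:Int) ≤ d) with h1 | h1
      · exfalso; rw [← h1, mul_one] at hd; omega
      · omega
    rcases le_total i d with hmin | hmin
    · exact h i h2 (by nlinarith) ⟨d, hd⟩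
    · exact h d hd2 (by nlinarith) ⟨i, by rw [hd]; ring⟩

lemma prime_eq (x : Int) (hx : 2 ≤ x) : pyIsPrime x = isPrimeSqrt x := by
  rw [Bool.eq_iff_iff, pyIsPrime_iff, prime_bridge x hx]
  unfold isPrimeSqrt
  rw [trialLoop_iff x _ 2 (by omega) rfl]

lemma gcd_step (n1 n2 : Int) :
    Int.gcd n2 (PySem.Int.mod n1 n2) = Int.gcd n1 n2 := by
  have hm : PySem.Int.mod n1 n2 = n1 + (-(PySem.Int.floordiv n1 n2)) * n2 := by
    have := PySem.Int.floordiv_mul_add_mod n1 n2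
    linarith
  rw [hm, Int.gcd_add_mul_right_right n2 n1 (-(PySem.Int.floordiv n1 n2)), Int.gcd_comm]

lemma gcdLoop_eq : ∀ (k : Nat) (x y : Int), y.natAbs = k → gcdLoop x y = (Int.gcd x y : Int) := by
  intro k
  induction k using Nat.strong_induction_on with
  | _ k IH =>
    intro x y hk
    rw [gcdLoop]
    by_cases hy : y ≠ 0
    · rw [dif_pos hy]
      have hbound : (PySem.Int.mod x y).natAbs < k := by
        rcases lt_or_gt_of_ne hy with hneg | hpos
        · have h1 := PySem.Int.mod_neg_bounds x hneg; omega
        · have h1 := PySem.Int.mod_nonneg x hpos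
          have h2 := PySem.Int.mod_lt x hpos; omega
      rw [IH _ hbound y (PySem.Int.mod x y) rfl, gcd_step, Int.gcd_comm]
    · rw [dif_neg hy]
      have hy0 : y = 0 := by omega
      subst hy0
      rw [Int.gcd_zero_right, Int.abs_eq_natAbs]

lemma euclid_iff : ∀ (k : Nat) (n2 n1 r : Int), 1 < n2 → n2.toNat = k →
    (euclidLoop n1 n2 r = 1 ↔ Int.gcd n1 n2 = 1) := by
  intro k
  induction k using Nat.strong_induction_on with
  | _ k IH =>
    intro n2 n1 r h2 hk
    rw [euclidLoop, dif_pos h2]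
    have hnn := PySem.Int.mod_nonneg n1 (b := n2) (by omega)
    have hlt := PySem.Int.mod_lt n1 (b := n2) (by omega)
    set m := PySem.Int.mod n1 n2 with hm
    have hg : Int.gcd n2 m = Int.gcd n1 n2 := gcd_step n1 n2
    by_cases hm1 : 1 < m
    · rw [IH m.toNat (by omega) m n2 m hm1 rfl, hg]
    · rw [euclidLoop, dif_neg hm1]
      rcases (by omega : m = 0 ∨ m = 1) with h0 | h1
      · rw [h0]
        constructor
        · intro h; exact absurd h (by norm_num)
        · intro h
          rw [← hg, h0] at h
          simp [Int.gcd] at h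
          omega
      · rw [h1]
        simp only [iff_true]
        rw [← hg, h1]
        simp [Int.gcd]

lemma lookup_eq_find (xs : List (String × Int)) (v : Int) :
    lookupKeyByValue xs v = (xs.find? (fun kv => kv.2 == v)).map (·.1) := by
  induction xs with
  | nil => rfl
  | cons hd tl ih =>
      obtain ⟨k, val⟩ := hd
      by_cases h : val = v
      · simp [lookupKeyByValue, List.find?, h]
      · have hb : (val == v) = false := by simpa using h
        simp [lookupKeyByValue, List.find?, h, hb, ih]

-- the truthiness of A's coprimality test equals B's guard, for n ≥ 2, a ≠ n
lemma truthy_iff (a n : Int) (hn : 2 ≤ n) (hne : a ≠ n) :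
    ((areRelativePrime a n).truthy = true)
      ↔ (a ≠ n ∧ 1 < (if a < n then a else n) ∧ gcdLoop a n = 1
            ∧ isPrimeSqrt (if a < n then n else a) = true) := by
  have hgcd : gcdLoop a n = (Int.gcd a n : Int) := gcdLoop_eq _ a n rfl
  rcases lt_or_gt_of_ne hne with hlt | hgt
  · -- a < n : flag = isPrime n, swap puts (n, a)
    rw [if_pos hlt, if_pos hlt]
    unfold areRelativePrime
    rw [if_neg (by omega), if_pos (by omega)]
    unfold relPrimeCont
    rw [prime_eq n hn]
    by_cases hp : isPrimeSqrt n = true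
    · rw [if_pos hp]
      simp only [if_pos (show n > a by omega), RelPrimeRes.truthy, beq_iff_eq]
      have hc : Int.gcd n a = Int.gcd a n := Int.gcd_comm n a
      by_cases ha : 1 < a
      · rw [euclid_iff a.toNat a n n ha rfl]
        constructor
        · intro h
          refine ⟨hne, ha, ?_, hp⟩
          rw [hgcd, ← hc, h]
          norm_num
        · rintro ⟨-, -, hg, -⟩
          rw [hgcd, ← hc] at hg
          exact_mod_cast hg
      · rw [euclidLoop, dif_neg ha]
        constructor
        · intro h; exact absurd h (by omega)
        · rintro ⟨-, ha', -, -⟩; exact absurd ha' ha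
    · rw [if_neg hp]
      simp only [RelPrimeRes.truthy]
      simp [hp]
  · -- n < a : flag = isPrime a, no swap: (a, n)
    rw [if_neg (by omega), if_neg (by omega)]
    unfold areRelativePrime
    rw [if_pos (by omega)]
    unfold relPrimeCont
    have ha2 : 2 ≤ a := by omega
    rw [prime_eq a ha2]
    by_cases hp : isPrimeSqrt a = true
    · rw [if_pos hp]
      simp only [if_neg (show ¬ n > a by omega), RelPrimeRes.truthy, beq_iff_eq]
      rw [euclid_iff n.toNat n a a (by omega) rfl]
      constructor
      · intro h
        refine ⟨hne, by omega, ?_, hp⟩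
        rw [hgcd, h]
        norm_num
      · rintro ⟨-, -, hg, -⟩
        rw [hgcd] at hg
        exact_mod_cast hg
    · rw [if_neg hp]
      simp only [RelPrimeRes.truthy]
      simp [hp]

lemma main_eq (encrypt_char : Int) (letter_set : List (String × Int)) (a b : Int)
    (hn : 2 ≤ (letter_set.length : Int)) (hne : a ≠ (letter_set.length : Int)) :
    DecryptCharacter encrypt_char letter_set a b
      = DecryptCharacter_alt encrypt_char letter_set a b := by
  unfold DecryptCharacter DecryptCharacter_alt
  have hiff := truthy_iff a (letter_set.length : Int) hn hne
  by_cases h : (areRelativePrime a (letter_set.length : Int)).truthy = true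
  · rw [if_pos h, if_pos (hiff.mp h),
      if_neg (show ¬ ((letter_set.length : Int) - 2 < 0) by omega)]
    rw [lookup_eq_find, PySem.Int.powMod_eq]
  · rw [if_neg h, if_neg (fun hc => h (hiff.mpr hc))]

-- on a singleton letter set with a ≥ 2 both programs return the error message
lemma one_eq (encrypt_char : Int) (letter_set : List (String × Int)) (a b : Int)
    (hlen : letter_set.length = 1) (ha : 2 ≤ a) :
    DecryptCharacter encrypt_char letter_set a b
      = DecryptCharacter_alt encrypt_char letter_set a b := by
  unfold DecryptCharacter DecryptCharacter_alt
  rw [hlen]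
  have htr : (areRelativePrime a ((1 : Nat) : Int)).truthy = false := by
    unfold areRelativePrime
    rw [if_pos (by omega : a > ((1 : Nat) : Int))]
    unfold relPrimeCont
    by_cases hp : pyIsPrime a = true
    · rw [if_pos hp]
      simp only [if_neg (show ¬ ((1 : Nat) : Int) > a by omega), RelPrimeRes.truthy]
      rw [euclidLoop, dif_neg (by norm_num : ¬ (1 : Int) < ((1 : Nat) : Int))]
      simp only [beq_eq_false_iff_ne, ne_eq]
      omega
    · rw [if_neg hp]
      rfl
  simp only [htr, Bool.false_eq_true, if_false]
  rw [if_neg]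
  rintro ⟨-, hlo, -, -⟩
  revert hlo
  split_ifs with h <;> omega

-- on an empty letter set with a ≤ -1 or a ≥ 2 both programs return the error message
lemma zero_eq (encrypt_char : Int) (letter_set : List (String × Int)) (a b : Int)
    (hlen : letter_set.length = 0) (ha : a ≤ -1 ∨ 2 ≤ a) :
    DecryptCharacter encrypt_char letter_set a b
      = DecryptCharacter_alt encrypt_char letter_set a b := by
  unfold DecryptCharacter DecryptCharacter_alt
  rw [hlen]
  have htr : (areRelativePrime a ((0 : Nat) : Int)).truthy = false := by
    unfold areRelativePrime
    rcases ha with ha | ha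
    · rw [if_neg (by omega : ¬ a > ((0 : Nat) : Int)), if_pos (by omega : ((0 : Nat) : Int) > a)]
      unfold relPrimeCont
      have hp0 : pyIsPrime ((0 : Nat) : Int) = true := by
        unfold pyIsPrime
        rw [PySem.List.pyRange_one_eq_nil (by norm_num)]
        rfl
      rw [if_pos hp0]
      simp only [if_pos (show ((0 : Nat) : Int) > a by omega), RelPrimeRes.truthy]
      rw [euclidLoop, dif_neg (by omega : ¬ (1 : Int) < a)]
      simp
    · rw [if_pos (by omega : a > ((0 : Nat) : Int))]
      unfold relPrimeCont
      by_cases hp : pyIsPrime a = true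
      · rw [if_pos hp]
        simp only [if_neg (show ¬ ((0 : Nat) : Int) > a by omega), RelPrimeRes.truthy]
        rw [euclidLoop, dif_neg (by norm_num : ¬ (1 : Int) < ((0 : Nat) : Int))]
        simp only [beq_eq_false_iff_ne, ne_eq]
        omega
      · rw [if_neg hp]
        rfl
  simp only [htr, Bool.false_eq_true, if_false]
  rw [if_neg]
  rintro ⟨-, hlo, -, -⟩
  revert hlo
  split_ifs with h <;> omega

-- ===== VERDICT (by name: the statement is the Claim_ definition above) =====
theorem DecryptCharacter_spec : Claim_unchanged_DecryptCharacter := by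
  intro encrypt_char letter_set a b _hdom hpre hnd
  unfold Pre_DecryptCharacter at hpre
  unfold D_DecryptCharacter at hnd
  push Not at hnd
  obtain ⟨hd1, hd2⟩ := hnd
  rcases (by omega : letter_set.length = 0 ∨ letter_set.length = 1 ∨ 2 ≤ letter_set.length)
    with h0 | h1 | h2
  · have ha0 : a ≠ 0 := fun hc => hpre (Or.inl ⟨h0, Or.inl hc⟩)
    have ha1 : a ≠ 1 := fun hc => hpre (Or.inl ⟨h0, Or.inr hc⟩)
    exact zero_eq encrypt_char letter_set a b h0 (by omega)
  · obtain ⟨ha1, hge⟩ := hd2 h1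
    have ha0 : a ≠ 0 := fun hc => hpre (Or.inr ⟨h1, hc⟩)
    exact one_eq encrypt_char letter_set a b h1 (by omega)
  · exact main_eq encrypt_char letter_set a b (by omega) hd1

theorem DecryptCharacter_changed : Claim_changed_DecryptCharacter := by
  unfold Claim_changed_DecryptCharacter
  decide
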